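-- pv_equiv track=rewrite | github.com/eulersformula/Lintcode-LeetCode | Rat_Jump.py | rat_jump
-- ===== SOURCE A (Python) =====
-- from typing import (
--     List,
-- )
--
-- def rat_jump(arr: List[int]) -> int:
--     # Write your code here.
--     # Questions to ask:
--     # 1. What is the range of the length of the array?
--     # 2. Clarification: last element of arr is for level 0?
--     # 3. Is it OK for level 0 to have glue if rat jumps to level 0?
--     if len(arr) == 0:
--         return 0
--     res = 0
--     state_dict = dict()
--     n = len(arr) - 1
--     state_dict[n] = 1
--     n_jumps = 0
--     while len(state_dict) > 0:
--         # guarantees that the paths are different since no same level after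
--         # the same number of jumps throughout.
--         cur_state_dict = dict()
--         n_jumps += 1
--         for level in state_dict:
--             if level <= 0:
--                 res += state_dict[level]
--                 # 本来此行加了state_dict.pop(level)，显示错误
--                 # dictionary changed size during iteration
--             elif arr[n-level] == 0: #if 1, throw away
--                 if n_jumps % 2 == 0:
--                     for v in [1, 3, 4]:
--                         if (level - v) not in cur_state_dict:
--                             cur_state_dict[level-v] = 0
--                         cur_state_dict[level-v] += state_dict[level]
--                 else:
--                     for v in [1, 2, 4]:
--                         if (level - v) not in cur_state_dict:
--                             cur_state_dict[level-v] = 0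
--                         cur_state_dict[level-v] += state_dict[level]
--         state_dict = cur_state_dict
--     return res % int(1e9+7)
-- ===== SOURCE B (Python) =====
-- def rat_jump(arr):
--     # Linear backward DP over levels with two parity windows (completions
--     # from level L when the next jump is the odd/even-numbered one),
--     # instead of A's per-jump BFS over dicts of reachable levels.
--     if not arr:
--         return 0
--     w0 = (1, 1, 1, 1)  # (c[L-4], c[L-3], c[L-2], c[L-1]) completions, next jump odd  (steps 1,2,4)
--     w1 = (1, 1, 1, 1)  # same, next jump even (steps 1,3,4); levels <= 0 count as arrived
--     for x in reversed(arr[:-1]):  # x = arr[i] guards level L = len(arr)-1-i, L = 1..n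
--         if x == 0:
--             a = w1[3] + w1[2] + w1[0]
--             b = w0[3] + w0[1] + w0[0]
--         else:
--             a = b = 0
--         w0 = (w0[1], w0[2], w0[3], a)
--         w1 = (w1[1], w1[2], w1[3], b)
--     return w0[3] % 1000000007
-- ===== Notes on version B (the rewrite author's own statement) =====
-- stated objective: alternative
-- what changed: Replaces A's per-jump BFS that carries a dict of all currently reachable levels (re-expanded level by level every jump) with a single backward linear DP keeping, per jump parity, a 4-value sliding window of the number of ways to finish from each level.
import Mathlib
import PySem

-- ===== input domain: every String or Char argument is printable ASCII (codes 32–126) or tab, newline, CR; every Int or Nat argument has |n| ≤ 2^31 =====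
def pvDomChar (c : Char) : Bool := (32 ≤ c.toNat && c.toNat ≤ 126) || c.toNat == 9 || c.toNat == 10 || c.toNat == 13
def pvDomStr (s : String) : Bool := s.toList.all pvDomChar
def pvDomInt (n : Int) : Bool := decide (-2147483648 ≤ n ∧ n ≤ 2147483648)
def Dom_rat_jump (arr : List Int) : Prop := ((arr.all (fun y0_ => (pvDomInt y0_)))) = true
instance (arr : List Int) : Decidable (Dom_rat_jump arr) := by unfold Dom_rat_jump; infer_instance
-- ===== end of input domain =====

-- B replaces A's per-jump BFS (a dict of currently reachable levels, re-expanded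
-- every jump) by a linear backward DP keeping, per jump parity, a 4-value sliding
-- window of the number of ways to finish from each level; same return value.

-- ===== PORT A =====
-- one body of A's inner `for level in state_dict` loop; kv is an (level, count) item.
-- Python indexes arr[n-level], always in range when reached; the unreachable
-- out-of-range case (pyGet? = none) falls into the discarding else-branch.
def ratStep (arr : List Int) (nn j' : Int) (acc : Int × PySem.Dict Int Int)
    (kv : Int × Int) : Int × PySem.Dict Int Int :=
  if kv.1 ≤ 0 then (acc.1 + kv.2, acc.2)
  else if PySem.List.pyGet? arr (nn - kv.1) = some 0 then
    (acc.1,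
      (if PySem.Int.mod j' 2 = 0 then [(1 : Int), 3, 4] else [(1 : Int), 2, 4]).foldl
        (fun cd v => cd.insert (kv.1 - v) (cd.getD (kv.1 - v) 0 + kv.2)) acc.2)
  else acc

-- A's `while len(state_dict) > 0` loop; the fuel only makes the recursion
-- structural — arr.length + 2 iterations always suffice (max level drops each turn).
def ratLoop (arr : List Int) (nn : Int) : Nat → PySem.Dict Int Int → Int → Int → Int
  | 0, _, _, res => res
  | fuel + 1, d, j, res =>
    if d.items.length = 0 then res
    else
      let acc := d.items.foldl (ratStep arr nn (j + 1)) (res, PySem.Dict.empty)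
      ratLoop arr nn fuel acc.2 (j + 1) acc.1

def rat_jump (arr : List Int) : Int :=
  if arr.length = 0 then 0
  else
    PySem.Int.mod
      (ratLoop arr ((arr.length : Int) - 1) (arr.length + 2)
        ((PySem.Dict.empty : PySem.Dict Int Int).insert ((arr.length : Int) - 1) 1) 0 0)
      1000000007

-- ===== PORT B =====
-- one body of B's loop: shift both parity windows after computing the two new cells
def ratJumpStep (w : (Int × Int × Int × Int) × (Int × Int × Int × Int)) (x : Int) :
    (Int × Int × Int × Int) × (Int × Int × Int × Int) :=
  let w0 := w.1
  let w1 := w.2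
  let a := if x = 0 then w1.2.2.2 + w1.2.2.1 + w1.1 else 0
  let b := if x = 0 then w0.2.2.2 + w0.2.1 + w0.1 else 0
  ((w0.2.1, w0.2.2.1, w0.2.2.2, a), (w1.2.1, w1.2.2.1, w1.2.2.2, b))

def rat_jump_alt (arr : List Int) : Int :=
  if arr = [] then 0
  else
    PySem.Int.mod
      ((arr.dropLast.reverse.foldl ratJumpStep ((1, 1, 1, 1), (1, 1, 1, 1))).1.2.2.2)
      1000000007

-- ===== PRECONDITION & SPEC =====
def Spec_rat_jump (arr : List Int) (out : Int) : Prop := out = rat_jump_alt arr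
instance (arr : List Int) (out : Int) : Decidable (Spec_rat_jump arr out) := by unfold Spec_rat_jump; infer_instance

-- ===== CLAIM (what is proved, stated in full; the proofs are below) =====
def Claim_equal_rat_jump : Prop := ∀ (arr : List Int), Dom_rat_jump arr → Spec_rat_jump arr (rat_jump arr)

-- ===== LEMMAS AND PROOFS =====

-- number of ways to reach a level ≤ 0 from level L, when the next jump is the
-- even-numbered one (p = true, steps 1,3,4) or the odd-numbered one (p = false, steps 1,2,4)
def ratG (arr : List Int) (nn : Int) (p : Bool) (L : Int) : Int :=
  if _h : L ≤ 0 then 1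
  else if PySem.List.pyGet? arr (nn - L) = some 0 then
    (if p then ratG arr nn false (L - 1) + ratG arr nn false (L - 3) + ratG arr nn false (L - 4)
     else ratG arr nn true (L - 1) + ratG arr nn true (L - 2) + ratG arr nn true (L - 4))
  else 0
termination_by L.toNat
decreasing_by all_goals omega

lemma ratG_nonpos (arr : List Int) (nn : Int) (p : Bool) (L : Int) (h : L ≤ 0) :
    ratG arr nn p L = 1 := by
  rw [ratG, dif_pos h]

lemma ratG_pos (arr : List Int) (nn : Int) (p : Bool) (L : Int) (h : 0 < L) :
    ratG arr nn p L =
      if PySem.List.pyGet? arr (nn - L) = some 0 then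
        (if p then ratG arr nn false (L - 1) + ratG arr nn false (L - 3) + ratG arr nn false (L - 4)
         else ratG arr nn true (L - 1) + ratG arr nn true (L - 2) + ratG arr nn true (L - 4))
      else 0 := by
  rw [ratG, dif_neg (by omega)]

-- Python list indexing shifts across a cons cell (nonnegative index)
lemma pyGet_cons_succ (x : Int) (ys : List Int) (m : Int) (h : 0 ≤ m) :
    PySem.List.pyGet? (x :: ys) (m + 1) = PySem.List.pyGet? ys m := by
  simp only [PySem.List.pyGet?, PySem.List.pyIdx?]
  have h1 : (0 : Int) ≤ m + 1 := by omega
  rw [if_pos h1, if_pos h]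
  rcases lt_or_ge m (ys.length : Int) with hlt | hge
  · rw [if_pos (by simpa using hlt), if_pos hlt]
    have h2 : (m + 1).toNat = m.toNat + 1 := by omega
    simp [h2]
  · rw [if_neg (by simp; omega), if_neg (by omega)]
    rfl

lemma pyGet_cons_zero (x : Int) (ys : List Int) :
    PySem.List.pyGet? (x :: ys) 0 = some x := by
  simp [PySem.List.pyGet?, PySem.List.pyIdx?]

-- total weight of a dict of (level, count) pairs under a valuation f of levels
def wsum (d : PySem.Dict Int Int) (f : Int → Int) : Int :=
  (d.items.map (fun p => p.2 * f p.1)).sum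

lemma sum_map_replace (f : Int → Int) (k v w : Int) :
    ∀ (l : List (Int × Int)), (l.map (fun p => p.1)).Nodup → (k, v) ∈ l →
      ((l.map (fun p => if p.1 == k then (k, w) else p)).map (fun p => p.2 * f p.1)).sum
        = (l.map (fun p => p.2 * f p.1)).sum - v * f k + w * f k := by
  intro l
  induction l with
  | nil => intro _ h; simp at h
  | cons q t ih =>
    intro hnd hmem
    rw [List.map_cons] at hnd
    rcases List.nodup_cons.mp hnd with ⟨hq, hndt⟩
    by_cases hqk : q.1 = k
    · have hv : q = (k, v) := by
        rcases List.mem_cons.mp hmem with h | h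
        · exact h.symm
        · exact absurd (by rw [hqk]; exact List.mem_map.mpr ⟨(k, v), h, rfl⟩) hq
      have ht : t.map (fun p => if p.1 == k then (k, w) else p) = t := by
        apply List.map_congr_left ?_ |>.trans t.map_id
        intro p hp
        have : p.1 ≠ k := fun hpk => hq (by rw [hqk]; exact List.mem_map.mpr ⟨p, hp, hpk⟩)
        simp [this]
      simp only [List.map_cons, ht, List.sum_cons, hv]
      simp only [beq_self_eq_true, if_pos]
      ring
    · have hmem' : (k, v) ∈ t := by
        rcases List.mem_cons.mp hmem with h | h
        · exact absurd (congrArg Prod.fst h).symm hqk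
        · exact h
      have hne : (q.1 == k) = false := by simp [hqk]
      simp only [List.map_cons, List.sum_cons, hne, Bool.false_eq_true, if_false]
      rw [ih hndt hmem']
      ring

lemma wsum_addTo (d : PySem.Dict Int Int) (k c : Int) (f : Int → Int)
    (hnd : d.keys.Nodup) :
    wsum (d.insert k (d.getD k 0 + c)) f = wsum d f + c * f k := by
  by_cases hc : d.contains k
  · have hk : k ∈ d.items.map (fun p => p.1) := (PySem.Dict.contains_iff_mem_keys d k).mp hc
    obtain ⟨p, hp, hp1⟩ := List.mem_map.mp hk
    have hpmem : (k, p.2) ∈ d.items := by rw [← hp1]; exact hp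
    have hgd : d.getD k 0 = p.2 := PySem.Dict.getD_of_mem_items d hpmem hnd 0
    unfold wsum
    rw [PySem.Dict.items_insert_of_contains d _ hc]
    rw [sum_map_replace f k p.2 (d.getD k 0 + c) d.items hnd hpmem]
    rw [hgd]; ring
  · unfold wsum
    rw [PySem.Dict.items_insert_of_not_contains d _ (by simpa using hc)]
    rw [PySem.Dict.getD_of_not_contains d 0 (by simpa using hc)]
    rw [List.map_append, List.sum_append]
    simp

lemma parityFlip (a : Int) :
    decide (PySem.Int.mod (a + 1) 2 = 0) = !decide (PySem.Int.mod a 2 = 0) := by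
  simp only [PySem.Int.mod_eq_emod_of_pos (show (0:Int) < 2 by norm_num)]
  rcases Int.emod_two_eq a with h | h
  · have h2 : (a + 1) % 2 = 1 := by omega
    simp [h, h2]
  · have h2 : (a + 1) % 2 = 0 := by omega
    simp [h, h2]

-- one pass of A's inner loop: total weight is conserved, keys stay unique and drop
lemma ratStep_fold (arr : List Int) (nn j' : Int) (p : Bool)
    (hp : p = decide (PySem.Int.mod j' 2 = 0)) :
    ∀ (l : List (Int × Int)) (res0 : Int) (cur : PySem.Dict Int Int), cur.keys.Nodup →
      ((l.foldl (ratStep arr nn j') (res0, cur)).1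
          + wsum (l.foldl (ratStep arr nn j') (res0, cur)).2 (ratG arr nn (!p))
        = res0 + wsum cur (ratG arr nn (!p))
          + (l.map (fun q => q.2 * ratG arr nn p q.1)).sum)
      ∧ (l.foldl (ratStep arr nn j') (res0, cur)).2.keys.Nodup
      ∧ (∀ K ∈ (l.foldl (ratStep arr nn j') (res0, cur)).2.keys,
          K ∈ cur.keys ∨ ∃ q ∈ l, 0 < q.1 ∧ K ≤ q.1 - 1) := by
  intro l
  induction l with
  | nil =>
    intro res0 cur hnd
    refine ⟨by simp, hnd, fun K hK => Or.inl hK⟩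
  | cons q t ih =>
    intro res0 cur hnd
    rw [List.foldl_cons]
    by_cases h1 : q.1 ≤ 0
    · have hstep : ratStep arr nn j' (res0, cur) q = (res0 + q.2, cur) := by
        simp [ratStep, h1]
      rw [hstep]
      obtain ⟨e, hnd', hb⟩ := ih (res0 + q.2) cur hnd
      refine ⟨?_, hnd', ?_⟩
      · rw [e, List.map_cons, List.sum_cons, ratG_nonpos arr nn p q.1 h1]; ring
      · intro K hK
        rcases hb K hK with h | ⟨q', hq', hh⟩
        · exact Or.inl h
        · exact Or.inr ⟨q', List.mem_cons_of_mem _ hq', hh⟩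
    · by_cases h2 : PySem.List.pyGet? arr (nn - q.1) = some 0
      · by_cases hm : PySem.Int.mod j' 2 = 0
        · -- p = true, steps 1,3,4
          have hdvd : 2 ∣ j' := (PySem.Int.mod_eq_zero_iff_dvd j' 2).mp hm
          have hpt : p = true := by rw [hp]; simp [hdvd]
          have hstep : ratStep arr nn j' (res0, cur) q =
              (res0, (((cur.insert (q.1 - 1) (cur.getD (q.1 - 1) 0 + q.2)).insert (q.1 - 3)
                ((cur.insert (q.1 - 1) (cur.getD (q.1 - 1) 0 + q.2)).getD (q.1 - 3) 0 + q.2)).insert (q.1 - 4)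
                (((cur.insert (q.1 - 1) (cur.getD (q.1 - 1) 0 + q.2)).insert (q.1 - 3)
                ((cur.insert (q.1 - 1) (cur.getD (q.1 - 1) 0 + q.2)).getD (q.1 - 3) 0 + q.2)).getD (q.1 - 4) 0 + q.2))) := by
            simp [ratStep, h1, h2, hdvd]
          rw [hstep]
          have hnd1 : ((cur.insert (q.1 - 1) (cur.getD (q.1 - 1) 0 + q.2))).keys.Nodup :=
            PySem.Dict.nodup_keys_insert _ _ _ hnd
          have hnd2 := PySem.Dict.nodup_keys_insert ((cur.insert (q.1 - 1) (cur.getD (q.1 - 1) 0 + q.2))) (q.1 - 3) (((cur.insert (q.1 - 1) (cur.getD (q.1 - 1) 0 + q.2))).getD (q.1 - 3) 0 + q.2) hnd1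
          have hnd3 := PySem.Dict.nodup_keys_insert _ (q.1 - 4)
            (((cur.insert (q.1 - 1) (cur.getD (q.1 - 1) 0 + q.2)).insert (q.1 - 3)
              ((cur.insert (q.1 - 1) (cur.getD (q.1 - 1) 0 + q.2)).getD (q.1 - 3) 0 + q.2)).getD (q.1 - 4) 0 + q.2) hnd2
          obtain ⟨e, hnd', hb⟩ := ih res0 _ hnd3
          refine ⟨?_, hnd', ?_⟩
          · rw [e]
            rw [wsum_addTo _ _ _ _ hnd2, wsum_addTo _ _ _ _ hnd1, wsum_addTo _ _ _ _ hnd]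
            rw [List.map_cons, List.sum_cons, ratG_pos arr nn p q.1 (by omega), if_pos h2, hpt]
            simp
            try ring
          · intro K hK
            rcases hb K hK with h | ⟨q', hq', hh⟩
            · rcases (PySem.Dict.mem_keys_insert _ _ _ _).mp h with h4 | h4
              · exact Or.inr ⟨q, List.mem_cons_self .., by constructor <;> omega⟩
              rcases (PySem.Dict.mem_keys_insert _ _ _ _).mp h4 with h3 | h3
              · exact Or.inr ⟨q, List.mem_cons_self .., by constructor <;> omega⟩
              rcases (PySem.Dict.mem_keys_insert _ _ _ _).mp h3 with h0 | h0
              · exact Or.inr ⟨q, List.mem_cons_self .., by constructor <;> omega⟩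
              · exact Or.inl h0
            · exact Or.inr ⟨q', List.mem_cons_of_mem _ hq', hh⟩
        · -- p = false, steps 1,2,4
          have hndvd : ¬ 2 ∣ j' := fun hd => hm ((PySem.Int.mod_eq_zero_iff_dvd j' 2).mpr hd)
          have hpt : p = false := by rw [hp]; simp [hndvd]
          have hstep : ratStep arr nn j' (res0, cur) q =
              (res0, (((cur.insert (q.1 - 1) (cur.getD (q.1 - 1) 0 + q.2)).insert (q.1 - 2)
                ((cur.insert (q.1 - 1) (cur.getD (q.1 - 1) 0 + q.2)).getD (q.1 - 2) 0 + q.2)).insert (q.1 - 4)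
                (((cur.insert (q.1 - 1) (cur.getD (q.1 - 1) 0 + q.2)).insert (q.1 - 2)
                ((cur.insert (q.1 - 1) (cur.getD (q.1 - 1) 0 + q.2)).getD (q.1 - 2) 0 + q.2)).getD (q.1 - 4) 0 + q.2))) := by
            simp [ratStep, h1, h2, hndvd]
          rw [hstep]
          have hnd1 : ((cur.insert (q.1 - 1) (cur.getD (q.1 - 1) 0 + q.2))).keys.Nodup :=
            PySem.Dict.nodup_keys_insert _ _ _ hnd
          have hnd2 := PySem.Dict.nodup_keys_insert ((cur.insert (q.1 - 1) (cur.getD (q.1 - 1) 0 + q.2))) (q.1 - 2) (((cur.insert (q.1 - 1) (cur.getD (q.1 - 1) 0 + q.2))).getD (q.1 - 2) 0 + q.2) hnd1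
          have hnd3 := PySem.Dict.nodup_keys_insert _ (q.1 - 4)
            (((cur.insert (q.1 - 1) (cur.getD (q.1 - 1) 0 + q.2)).insert (q.1 - 2)
              ((cur.insert (q.1 - 1) (cur.getD (q.1 - 1) 0 + q.2)).getD (q.1 - 2) 0 + q.2)).getD (q.1 - 4) 0 + q.2) hnd2
          obtain ⟨e, hnd', hb⟩ := ih res0 _ hnd3
          refine ⟨?_, hnd', ?_⟩
          · rw [e]
            rw [wsum_addTo _ _ _ _ hnd2, wsum_addTo _ _ _ _ hnd1, wsum_addTo _ _ _ _ hnd]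
            rw [List.map_cons, List.sum_cons, ratG_pos arr nn p q.1 (by omega), if_pos h2, hpt]
            simp
            try ring
          · intro K hK
            rcases hb K hK with h | ⟨q', hq', hh⟩
            · rcases (PySem.Dict.mem_keys_insert _ _ _ _).mp h with h4 | h4
              · exact Or.inr ⟨q, List.mem_cons_self .., by constructor <;> omega⟩
              rcases (PySem.Dict.mem_keys_insert _ _ _ _).mp h4 with h3 | h3
              · exact Or.inr ⟨q, List.mem_cons_self .., by constructor <;> omega⟩
              rcases (PySem.Dict.mem_keys_insert _ _ _ _).mp h3 with h0 | h0
              · exact Or.inr ⟨q, List.mem_cons_self .., by constructor <;> omega⟩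
              · exact Or.inl h0
            · exact Or.inr ⟨q', List.mem_cons_of_mem _ hq', hh⟩
      · have hstep : ratStep arr nn j' (res0, cur) q = (res0, cur) := by
          simp [ratStep, h1, h2]
        rw [hstep]
        obtain ⟨e, hnd', hb⟩ := ih res0 cur hnd
        refine ⟨?_, hnd', ?_⟩
        · rw [e, List.map_cons, List.sum_cons, ratG_pos arr nn p q.1 (by omega), if_neg h2]
          ring
        · intro K hK
          rcases hb K hK with h | ⟨q', hq', hh⟩
          · exact Or.inl h
          · exact Or.inr ⟨q', List.mem_cons_of_mem _ hq', hh⟩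

lemma ratLoop_eq (arr : List Int) (nn : Int) :
    ∀ (fuel : Nat) (M : Int) (d : PySem.Dict Int Int) (j res : Int),
      d.keys.Nodup → (∀ K ∈ d.keys, K ≤ M) → M.toNat + 2 ≤ fuel →
      ratLoop arr nn fuel d j res
        = res + wsum d (ratG arr nn (decide (PySem.Int.mod (j + 1) 2 = 0))) := by
  intro fuel
  induction fuel with
  | zero => intro M d j res _ _ hf; omega
  | succ f ihf =>
    intro M d j res hnd hbd hf
    by_cases hne : d.items.length = 0
    · have hitems : d.items = [] := List.length_eq_zero_iff.mp hne
      simp [ratLoop, wsum, hitems]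
    · simp only [ratLoop, hne, if_false]
      set p := decide (PySem.Int.mod (j + 1) 2 = 0) with hpdef
      obtain ⟨e, hnd', hb⟩ := ratStep_fold arr nn (j + 1) p hpdef d.items res
        PySem.Dict.empty PySem.Dict.nodup_keys_empty
      have hwd : (d.items.map (fun q => q.2 * ratG arr nn p q.1)).sum
          = wsum d (ratG arr nn p) := rfl
      have hwe : wsum PySem.Dict.empty (ratG arr nn (!p)) = 0 := by
        simp [wsum, show (PySem.Dict.empty : PySem.Dict Int Int).items = [] from rfl]
      have hkeybd : ∀ K ∈ (d.items.foldl (ratStep arr nn (j + 1)) (res, PySem.Dict.empty)).2.keys,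
          K ≤ M - 1 := by
        intro K hK
        rcases hb K hK with h | ⟨q', hq', h0, hle⟩
        · simp [PySem.Dict.keys_empty] at h
        · have : q'.1 ∈ d.keys := PySem.Dict.mem_keys_of_mem_items d hq'
          have := hbd _ this
          omega
      have hflip : decide (PySem.Int.mod (j + 1 + 1) 2 = 0) = !p := by
        rw [hpdef]; exact parityFlip (j + 1)
      by_cases hM : 1 ≤ M
      · rw [ihf (M - 1) _ (j + 1) _ hnd' hkeybd (by omega)]
        rw [hflip]
        rw [hwe, hwd] at e
        linarith [e]
      · -- all keys nonpositive: the next dict is empty and the loop stops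
        have hkeynil : (d.items.foldl (ratStep arr nn (j + 1)) (res, PySem.Dict.empty)).2.keys = [] := by
          rcases hkn : (d.items.foldl (ratStep arr nn (j + 1)) (res, PySem.Dict.empty)).2.keys with _ | ⟨K, ks⟩
          · rfl
          · exfalso
            have hK : K ∈ (d.items.foldl (ratStep arr nn (j + 1)) (res, PySem.Dict.empty)).2.keys := by
              rw [hkn]; exact List.mem_cons_self ..
            rcases hb K hK with h | ⟨q', hq', h0, _⟩
            · simp [PySem.Dict.keys_empty] at h
            · have : q'.1 ∈ d.keys := PySem.Dict.mem_keys_of_mem_items d hq'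
              have := hbd _ this
              omega
        have hitemsnil : (d.items.foldl (ratStep arr nn (j + 1)) (res, PySem.Dict.empty)).2.items = [] := by
          have := hkeynil
          simpa [PySem.Dict.keys] using this
        obtain ⟨f', rfl⟩ : ∃ f', f = f' + 1 := ⟨f - 1, by omega⟩
        rw [ratLoop]
        rw [if_pos (by rw [hitemsnil]; rfl)]
        rw [hwe, hwd] at e
        have hwnil : wsum (d.items.foldl (ratStep arr nn (j + 1)) (res, PySem.Dict.empty)).2
            (ratG arr nn (!p)) = 0 := by
          simp [wsum, hitemsnil]
        linarith [e, hwnil]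

-- B's two parity windows: ratG at the four levels L-3 .. L
def ratWin (arr : List Int) (nn : Int) (p : Bool) (L : Int) : Int × Int × Int × Int :=
  (ratG arr nn p (L - 3), ratG arr nn p (L - 2), ratG arr nn p (L - 1), ratG arr nn p L)

lemma ratWin_nonpos (arr : List Int) (nn : Int) (p : Bool) (L : Int) (h : L ≤ 0) :
    ratWin arr nn p L = (1, 1, 1, 1) := by
  unfold ratWin
  rw [ratG_nonpos _ _ _ _ (by omega), ratG_nonpos _ _ _ _ (by omega),
      ratG_nonpos _ _ _ _ (by omega), ratG_nonpos _ _ _ _ h]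

-- ratG ignores the head cell once the level is at most ys.length - 1
lemma ratG_cons (x : Int) (ys : List Int) :
    ∀ (k : Nat) (p : Bool) (L : Int), L.toNat ≤ k → L ≤ (ys.length : Int) - 1 →
      ratG (x :: ys) (ys.length : Int) p L = ratG ys ((ys.length : Int) - 1) p L := by
  intro k
  induction k with
  | zero =>
    intro p L hk hL
    have h0 : L ≤ 0 := by omega
    rw [ratG_nonpos _ _ _ _ h0, ratG_nonpos _ _ _ _ h0]
  | succ k ih =>
    intro p L hk hL
    by_cases h0 : L ≤ 0
    · rw [ratG_nonpos _ _ _ _ h0, ratG_nonpos _ _ _ _ h0]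
    · have hpos : 0 < L := by omega
      rw [ratG_pos _ _ _ _ hpos, ratG_pos _ _ _ _ hpos]
      have hidx : PySem.List.pyGet? (x :: ys) ((ys.length : Int) - L)
          = PySem.List.pyGet? ys ((ys.length : Int) - 1 - L) := by
        have h1 : (ys.length : Int) - L = ((ys.length : Int) - 1 - L) + 1 := by ring
        rw [h1, pyGet_cons_succ _ _ _ (by omega)]
      rw [hidx]
      by_cases hg : PySem.List.pyGet? ys ((ys.length : Int) - 1 - L) = some 0
      · rw [if_pos hg, if_pos hg]
        cases p
        · rw [if_neg (by simp), if_neg (by simp)]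
          rw [ih true (L - 1) (by omega) (by omega), ih true (L - 2) (by omega) (by omega),
              ih true (L - 4) (by omega) (by omega)]
        · rw [if_pos rfl, if_pos rfl]
          rw [ih false (L - 1) (by omega) (by omega), ih false (L - 3) (by omega) (by omega),
              ih false (L - 4) (by omega) (by omega)]
      · rw [if_neg hg, if_neg hg]

-- B's fold computes the two windows at the top level
lemma alt_fold : ∀ (arr : List Int), arr ≠ [] →
    arr.dropLast.reverse.foldl ratJumpStep ((1, 1, 1, 1), (1, 1, 1, 1))
      = (ratWin arr ((arr.length : Int) - 1) false ((arr.length : Int) - 1),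
         ratWin arr ((arr.length : Int) - 1) true ((arr.length : Int) - 1)) := by
  intro arr
  induction arr with
  | nil => intro h; exact absurd rfl h
  | cons x ys ih =>
    intro _
    cases ys with
    | nil =>
      rw [ratWin_nonpos _ _ _ _ (by simp), ratWin_nonpos _ _ _ _ (by simp)]
      simp
    | cons y t =>
      have hlen : (((x :: y :: t).length : Int)) - 1 = (((y :: t).length : Int)) := by
        push_cast [List.length_cons]; ring
      rw [hlen]
      rw [List.dropLast_cons₂, List.reverse_cons, List.foldl_append]
      rw [ih (by simp)]
      simp only [List.foldl_cons, List.foldl_nil]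
      set m : Int := (((y :: t).length : Int)) with hm
      have hm1 : 1 ≤ m := by rw [hm]; simp
      have htrans : ∀ (p : Bool) (L : Int), L ≤ m - 1 →
          ratG (y :: t) (m - 1) p L = ratG (x :: y :: t) m p L := by
        intro p L hL
        exact (ratG_cons x (y :: t) L.toNat p L le_rfl (by rw [← hm]; exact hL)).symm
      have htopF : (if x = 0 then
            ratG (y :: t) (m - 1) true (m - 1) + ratG (y :: t) (m - 1) true (m - 1 - 1)
              + ratG (y :: t) (m - 1) true (m - 1 - 3)
          else 0) = ratG (x :: y :: t) m false m := by
        conv_rhs => rw [ratG_pos (x :: y :: t) m false m (by omega)]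
        rw [show m - m = (0 : Int) by ring, pyGet_cons_zero]
        by_cases hx : x = 0
        · rw [if_pos hx, if_pos (by rw [hx])]
          rw [if_neg (by simp)]
          rw [htrans true (m - 1) (by omega), htrans true (m - 1 - 1) (by omega),
              htrans true (m - 1 - 3) (by omega)]
          rw [show m - 1 - 1 = m - 2 by ring, show m - 1 - 3 = m - 4 by ring]
        · rw [if_neg hx, if_neg (by simpa using hx)]
      have htopT : (if x = 0 then
            ratG (y :: t) (m - 1) false (m - 1) + ratG (y :: t) (m - 1) false (m - 1 - 2)
              + ratG (y :: t) (m - 1) false (m - 1 - 3)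
          else 0) = ratG (x :: y :: t) m true m := by
        conv_rhs => rw [ratG_pos (x :: y :: t) m true m (by omega)]
        rw [show m - m = (0 : Int) by ring, pyGet_cons_zero]
        by_cases hx : x = 0
        · rw [if_pos hx, if_pos (by rw [hx])]
          rw [if_pos rfl]
          rw [htrans false (m - 1) (by omega), htrans false (m - 1 - 2) (by omega),
              htrans false (m - 1 - 3) (by omega)]
          rw [show m - 1 - 2 = m - 3 by ring, show m - 1 - 3 = m - 4 by ring]
        · rw [if_neg hx, if_neg (by simpa using hx)]
      simp only [ratJumpStep, ratWin, Prod.mk.injEq]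
      refine ⟨⟨?_, ?_, ?_, ?_⟩, ?_, ?_, ?_, ?_⟩
      · rw [htrans false (m - 1 - 2) (by omega)]; congr 1; ring
      · rw [htrans false (m - 1 - 1) (by omega)]; congr 1; ring
      · rw [htrans false (m - 1) (by omega)]
      · exact htopF
      · rw [htrans true (m - 1 - 2) (by omega)]; congr 1; ring
      · rw [htrans true (m - 1 - 1) (by omega)]; congr 1; ring
      · rw [htrans true (m - 1) (by omega)]
      · exact htopT

-- ===== VERDICT (by name: the statement is the Claim_ definition above) =====
theorem rat_jump_spec : Claim_equal_rat_jump := by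
  intro arr _
  unfold Spec_rat_jump
  by_cases h : arr = []
  · subst h; rfl
  · have hlen0 : ¬ arr.length = 0 := fun hh => h (List.length_eq_zero_iff.mp hh)
    unfold rat_jump rat_jump_alt
    rw [if_neg hlen0, if_neg h]
    have hnd0 : ((PySem.Dict.empty : PySem.Dict Int Int).insert ((arr.length : Int) - 1) 1).keys.Nodup :=
      PySem.Dict.nodup_keys_insert _ _ _ PySem.Dict.nodup_keys_empty
    have hbd0 : ∀ K ∈ ((PySem.Dict.empty : PySem.Dict Int Int).insert ((arr.length : Int) - 1) 1).keys,
        K ≤ (arr.length : Int) - 1 := by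
      intro K hK
      rcases (PySem.Dict.mem_keys_insert _ _ _ _).mp hK with h1 | h1
      · exact le_of_eq h1
      · simp [PySem.Dict.keys_empty] at h1
    rw [ratLoop_eq arr ((arr.length : Int) - 1) (arr.length + 2) ((arr.length : Int) - 1) _ 0 0
        hnd0 hbd0 (by omega)]
    have hm12 : (decide (PySem.Int.mod (0 + 1) 2 = 0)) = false := by decide
    rw [hm12]
    have hitems0 : ((PySem.Dict.empty : PySem.Dict Int Int).insert ((arr.length : Int) - 1) 1).items
        = [((arr.length : Int) - 1, 1)] := by
      rw [PySem.Dict.items_insert_of_not_contains _ _ (PySem.Dict.contains_empty _)]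
      simp [show (PySem.Dict.empty : PySem.Dict Int Int).items = [] from rfl]
    rw [alt_fold arr h]
    simp [wsum, hitems0, ratWin]
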